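-- pv_equiv track=rewrite | github.com/Oakstudy/algorithm | Codesignal/Eric/64.DifferentSquares.py | solution
-- ===== SOURCE A (Python) =====
-- def solution(m):
--     row = len(m)
--     col = len(m[0])
--     s_list = []
--     for r in range(row-1):
--         for c in range(col-1):
--             square = [m[r][c], m[r+1][c], m[r+1][c+1], m[r][c+1]]
--             if square not in s_list:
--                 s_list.append(square)
--     return len(s_list)
-- ===== SOURCE B (Python) =====
-- def solution(m):
--     col = len(m[0])
--     squares = sorted((m[r][c], m[r + 1][c], m[r + 1][c + 1], m[r][c + 1])
--                      for r in range(len(m) - 1) for c in range(col - 1))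
--     count = 0
--     prev = None
--     for sq in squares:
--         if prev is None or sq != prev:
--             count += 1
--         prev = sq
--     return count
-- ===== Notes on version B (the rewrite author's own statement) =====
-- stated objective: faster
-- what changed: B replaces A's quadratic not-in-list membership scan over the growing list of seen 2x2 blocks by materialising all blocks as tuples, sorting them, and counting distinct blocks in one linear pass over adjacent pairs.
import Mathlib
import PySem

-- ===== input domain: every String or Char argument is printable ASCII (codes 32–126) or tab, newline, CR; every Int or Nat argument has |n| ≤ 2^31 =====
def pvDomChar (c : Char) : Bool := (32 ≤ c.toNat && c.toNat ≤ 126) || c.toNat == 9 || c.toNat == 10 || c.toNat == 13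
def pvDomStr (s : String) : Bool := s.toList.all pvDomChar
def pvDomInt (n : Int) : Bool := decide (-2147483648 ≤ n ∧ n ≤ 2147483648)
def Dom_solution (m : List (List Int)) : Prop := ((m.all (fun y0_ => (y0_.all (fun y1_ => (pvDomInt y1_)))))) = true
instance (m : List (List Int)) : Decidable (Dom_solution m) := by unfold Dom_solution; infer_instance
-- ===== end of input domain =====

-- B replaces A's quadratic "not-in-list" dedup by sort-then-single-pass adjacent-difference counting (faster).

-- ===== PORT A =====
def solution (m : List (List Int)) : Int :=
  let row : Int := m.length
  let col : Int := (PySem.List.pyGetD m 0 []).length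
  let s_list : List (List Int) :=
    (PySem.List.pyRange 0 (row - 1) 1).foldl (fun s r =>
      (PySem.List.pyRange 0 (col - 1) 1).foldl (fun s c =>
        let square : List Int :=
          [PySem.List.pyGetD (PySem.List.pyGetD m r []) c 0,
           PySem.List.pyGetD (PySem.List.pyGetD m (r + 1) []) c 0,
           PySem.List.pyGetD (PySem.List.pyGetD m (r + 1) []) (c + 1) 0,
           PySem.List.pyGetD (PySem.List.pyGetD m r []) (c + 1) 0]
        if square ∈ s then s else s ++ [square]) s) []
  (s_list.length : Int)

-- ===== PORT B =====
-- Python tuple comparison is lexicographic: the sort key maps each 4-tuple into the lex order on Int ×ₗ (Int ×ₗ (Int ×ₗ Int)).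
def tupleKey (t : Int × Int × Int × Int) : Lex (Int × Lex (Int × Lex (Int × Int))) :=
  toLex (t.1, toLex (t.2.1, toLex (t.2.2.1, t.2.2.2)))

def solution_alt (m : List (List Int)) : Int :=
  let col : Int := (PySem.List.pyGetD m 0 []).length
  let squares : List (Int × Int × Int × Int) :=
    PySem.List.sorted
      ((PySem.List.pyRange 0 ((m.length : Int) - 1) 1).flatMap (fun r =>
        (PySem.List.pyRange 0 (col - 1) 1).map (fun c =>
          (PySem.List.pyGetD (PySem.List.pyGetD m r []) c 0,
           PySem.List.pyGetD (PySem.List.pyGetD m (r + 1) []) c 0,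
           PySem.List.pyGetD (PySem.List.pyGetD m (r + 1) []) (c + 1) 0,
           PySem.List.pyGetD (PySem.List.pyGetD m r []) (c + 1) 0))))
      tupleKey false
  let res : Int × Option (Int × Int × Int × Int) :=
    squares.foldl (fun st sq =>
      (if st.2 = none ∨ st.2 ≠ some sq then st.1 + 1 else st.1, some sq)) (0, none)
  res.1

-- ===== PRECONDITION & SPEC =====
-- Pre_ excludes exactly the inputs where the Python A raises an IndexError: the empty matrix
-- (m[0]), and matrices with ≥ 2 rows and ≥ 2 first-row columns where some row is shorter than the first.
def Pre_solution (m : List (List Int)) : Prop :=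
  m ≠ [] ∧ (2 ≤ m.length → 2 ≤ m.headI.length → ∀ row ∈ m, m.headI.length ≤ row.length)
instance (m : List (List Int)) : Decidable (Pre_solution m) := by unfold Pre_solution; infer_instance

def pvWitness_solution : List (List Int) := [[1, 2, 1], [2, 1, 2], [1, 2, 1]]

def Spec_solution (m : List (List Int)) (out : Int) : Prop := out = solution_alt m
instance (m : List (List Int)) (out : Int) : Decidable (Spec_solution m out) := by unfold Spec_solution; infer_instance

-- ===== CLAIM (what is proved, stated in full; the proofs are below) =====
def Claim_equal_solution : Prop := ∀ (m : List (List Int)), Dom_solution m → Pre_solution m → Spec_solution m (solution m)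


-- ===== LEMMAS AND PROOFS =====

-- the four entries of a 2x2 block, as A's list and as B's tuple
def sqT (m : List (List Int)) (r c : Int) : Int × Int × Int × Int :=
  (PySem.List.pyGetD (PySem.List.pyGetD m r []) c 0,
   PySem.List.pyGetD (PySem.List.pyGetD m (r + 1) []) c 0,
   PySem.List.pyGetD (PySem.List.pyGetD m (r + 1) []) (c + 1) 0,
   PySem.List.pyGetD (PySem.List.pyGetD m r []) (c + 1) 0)

def tl4 (t : Int × Int × Int × Int) : List Int := [t.1, t.2.1, t.2.2.1, t.2.2.2]

def squaresT (m : List (List Int)) : List (Int × Int × Int × Int) :=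
  (PySem.List.pyRange 0 ((m.length : Int) - 1) 1).flatMap (fun r =>
    (PySem.List.pyRange 0 (((PySem.List.pyGetD m 0 []).length : Int) - 1) 1).map (fun c => sqT m r c))

theorem tl4_injective : Function.Injective tl4 := by
  intro a b h
  obtain ⟨a1, a2, a3, a4⟩ := a
  obtain ⟨b1, b2, b3, b4⟩ := b
  simp only [tl4, List.cons.injEq, and_true] at h
  simp_all

theorem tupleKey_injective : Function.Injective tupleKey := by
  intro a b h
  obtain ⟨a1, a2, a3, a4⟩ := a
  obtain ⟨b1, b2, b3, b4⟩ := b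
  simp only [tupleKey, toLex] at h
  simp_all

theorem list_toFinset_map {α β : Type} [DecidableEq α] [DecidableEq β] (l : List α) (f : α → β) :
    (l.map f).toFinset = l.toFinset.image f := by
  ext x; simp

-- A's nested accumulation flattened into a single fold over the list of blocks
theorem nested_fold (rs cs : List Int) (f : Int → Int → List Int) (init : List (List Int)) :
    rs.foldl (fun s r => cs.foldl (fun s c => if f r c ∈ s then s else s ++ [f r c]) s) init
      = (rs.flatMap (fun r => cs.map (f r))).foldl (fun s q => if q ∈ s then s else s ++ [q]) init := by
  rw [List.foldl_flatMap]
  congr 1; funext s r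
  rw [List.foldl_map]

-- A's "if not in, append" fold produces a duplicate-free list with the same elements
theorem dedupAcc (ys : List (List Int)) : ∀ (acc : List (List Int)), acc.Nodup →
    (ys.foldl (fun s q => if q ∈ s then s else s ++ [q]) acc).Nodup ∧
    (ys.foldl (fun s q => if q ∈ s then s else s ++ [q]) acc).toFinset = acc.toFinset ∪ ys.toFinset := by
  induction ys with
  | nil => intro acc h; simpa using h
  | cons y ys ih =>
    intro acc h
    simp only [List.foldl_cons]
    by_cases hy : y ∈ acc
    · rw [if_pos hy]
      obtain ⟨h1, h2⟩ := ih acc h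
      refine ⟨h1, ?_⟩
      rw [h2]; ext x; simp only [Finset.mem_union, List.mem_toFinset, List.toFinset_cons,
        Finset.mem_insert]
      constructor
      · rintro (hx | hx) <;> tauto
      · rintro (hx | rfl | hx) <;> tauto
    · rw [if_neg hy]
      have hnd : (acc ++ [y]).Nodup := by
        rw [List.nodup_append]
        refine ⟨h, List.nodup_singleton y, ?_⟩
        intro a ha' b hb
        simp only [List.mem_singleton] at hb
        subst hb
        exact fun he => hy (he ▸ ha')
      obtain ⟨h1, h2⟩ := ih (acc ++ [y]) hnd
      refine ⟨h1, ?_⟩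
      rw [h2]; ext x; simp only [Finset.mem_union, List.mem_toFinset, List.mem_append,
        List.mem_singleton, List.toFinset_cons, Finset.mem_insert]
      tauto

theorem A_eq (m : List (List Int)) :
    solution m = (((squaresT m).map tl4).toFinset.card : Int) := by
  unfold solution
  dsimp only
  rw [show (fun (s : List (List Int)) (r : Int) =>
        (PySem.List.pyRange 0 (((PySem.List.pyGetD m 0 []).length : Int) - 1) 1).foldl
          (fun s c =>
            if [PySem.List.pyGetD (PySem.List.pyGetD m r []) c 0,
                PySem.List.pyGetD (PySem.List.pyGetD m (r + 1) []) c 0,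
                PySem.List.pyGetD (PySem.List.pyGetD m (r + 1) []) (c + 1) 0,
                PySem.List.pyGetD (PySem.List.pyGetD m r []) (c + 1) 0] ∈ s then s
            else s ++ [[PySem.List.pyGetD (PySem.List.pyGetD m r []) c 0,
                PySem.List.pyGetD (PySem.List.pyGetD m (r + 1) []) c 0,
                PySem.List.pyGetD (PySem.List.pyGetD m (r + 1) []) (c + 1) 0,
                PySem.List.pyGetD (PySem.List.pyGetD m r []) (c + 1) 0]]) s) =
      (fun s r =>
        (PySem.List.pyRange 0 (((PySem.List.pyGetD m 0 []).length : Int) - 1) 1).foldl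
          (fun s c => if tl4 (sqT m r c) ∈ s then s else s ++ [tl4 (sqT m r c)]) s) from rfl]
  rw [nested_fold]
  obtain ⟨h1, h2⟩ := dedupAcc ((PySem.List.pyRange 0 ((m.length : Int) - 1) 1).flatMap
    (fun r => (PySem.List.pyRange 0 (((PySem.List.pyGetD m 0 []).length : Int) - 1) 1).map
      (fun c => tl4 (sqT m r c)))) [] List.nodup_nil
  rw [← List.toFinset_card_of_nodup h1, h2]
  congr 2
  simp [squaresT, List.map_flatMap, List.map_map, Function.comp_def]

-- B's single pass over the sorted list counts one per distinct block
theorem count_go (s : List (Int × Int × Int × Int))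
    (hp : s.Pairwise (fun a b => tupleKey a ≤ tupleKey b)) :
    ∀ (a : Int × Int × Int × Int) (cnt : Int), (∀ y ∈ s, tupleKey a ≤ tupleKey y) →
    (s.foldl (fun st sq => (if st.2 = none ∨ st.2 ≠ some sq then st.1 + 1 else st.1, some sq))
        (cnt, some a)).1
      = cnt + ((insert a s.toFinset).card : Int) - 1 := by
  induction s with
  | nil => intro a cnt _; simp
  | cons x xs ih =>
    intro a cnt ha
    rw [List.pairwise_cons] at hp
    simp only [List.foldl_cons]
    by_cases hax : a = x
    · subst hax
      rw [if_neg (by simp)]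
      rw [ih hp.2 a cnt hp.1]
      simp [List.toFinset_cons]
    · rw [if_pos (Or.inr (by simp [hax]))]
      rw [ih hp.2 x (cnt + 1) hp.1]
      have hnotin : a ∉ insert x xs.toFinset := by
        simp only [Finset.mem_insert, List.mem_toFinset]
        rintro (rfl | hmem)
        · exact hax rfl
        · exact hax (tupleKey_injective (le_antisymm (ha x (by simp)) (hp.1 a hmem)))
      rw [List.toFinset_cons, Finset.card_insert_of_notMem hnotin]
      push_cast; ring

theorem count_main (s : List (Int × Int × Int × Int))
    (hp : s.Pairwise (fun a b => tupleKey a ≤ tupleKey b)) :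
    (s.foldl (fun st sq => (if st.2 = none ∨ st.2 ≠ some sq then st.1 + 1 else st.1, some sq))
        ((0 : Int), (none : Option (Int × Int × Int × Int)))).1
      = (s.toFinset.card : Int) := by
  cases s with
  | nil => simp
  | cons x xs =>
    rw [List.pairwise_cons] at hp
    simp only [List.foldl_cons]
    rw [if_pos (by simp)]
    rw [show (0 : Int) + 1 = 1 from rfl]
    rw [count_go xs hp.2 x 1 hp.1]
    rw [List.toFinset_cons]
    ring

theorem B_eq (m : List (List Int)) :
    solution_alt m = (((squaresT m)).toFinset.card : Int) := by
  unfold solution_alt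
  dsimp only
  rw [count_main _ (PySem.List.sorted_pairwise _ _)]
  rw [List.toFinset_eq_of_perm _ _ (PySem.List.sorted_perm _ _ _)]
  rfl

-- ===== VERDICT (by name: the statement is the Claim_ definition above) =====
theorem solution_spec : Claim_equal_solution := by
  intro m _ _
  unfold Spec_solution
  rw [A_eq, B_eq, list_toFinset_map, Finset.card_image_of_injective _ tl4_injective]
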